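-- pv_equiv track=rewrite | github.com/rathodvamshi/Privacy_Fortress | backend/app/vault/profile_vault.py | session_mappings_to_profile
-- ===== SOURCE A (Python) =====
-- from typing import Dict, Optional, Any, List
--
-- def session_mappings_to_profile(mappings: Dict[str, Dict]) -> Dict[str, Optional[str]]:
--     """
--     Extract a single user profile from session token mappings.
--     Takes first USER -> name, first COLLEGE -> college, first EMAIL -> email.
--     Used when saving "current session" into the persistent profile (one profile, not all sessions).
--     """
--     profile = {"name": None, "college": None, "email": None}
--     for token, data in mappings.items():
--         orig = (data.get("original") or "").strip()
--         if not orig: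
--             continue
--         entity_type = (data.get("entity_type") or "").upper()
--         if entity_type == "USER" and profile["name"] is None:
--             profile["name"] = orig
--         elif entity_type == "COLLEGE" and profile["college"] is None:
--             profile["college"] = orig
--         elif entity_type == "EMAIL" and profile["email"] is None:
--             profile["email"] = orig
--     return profile
-- ===== SOURCE B (Python) =====
-- def session_mappings_to_profile(mappings):
--     """Build the profile by three independent first-match scans, one per entity type."""
--     def first(etype):
--         for data in mappings.values():
--             orig = (data.get("original") or "").strip()
--             if orig and (data.get("entity_type") or "").upper() == etype:
--                 return orig
--         return None
--     return {"name": first("USER"), "college": first("COLLEGE"), "email": first("EMAIL")}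
-- ===== Notes on version B (the rewrite author's own statement) =====
-- stated objective: simpler
-- what changed: Replaces A's single interleaved pass with mutable first-wins state by a helper first(etype) performing an independent first-match scan per entity type; the dict is assembled directly from the three scans.
import Mathlib
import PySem

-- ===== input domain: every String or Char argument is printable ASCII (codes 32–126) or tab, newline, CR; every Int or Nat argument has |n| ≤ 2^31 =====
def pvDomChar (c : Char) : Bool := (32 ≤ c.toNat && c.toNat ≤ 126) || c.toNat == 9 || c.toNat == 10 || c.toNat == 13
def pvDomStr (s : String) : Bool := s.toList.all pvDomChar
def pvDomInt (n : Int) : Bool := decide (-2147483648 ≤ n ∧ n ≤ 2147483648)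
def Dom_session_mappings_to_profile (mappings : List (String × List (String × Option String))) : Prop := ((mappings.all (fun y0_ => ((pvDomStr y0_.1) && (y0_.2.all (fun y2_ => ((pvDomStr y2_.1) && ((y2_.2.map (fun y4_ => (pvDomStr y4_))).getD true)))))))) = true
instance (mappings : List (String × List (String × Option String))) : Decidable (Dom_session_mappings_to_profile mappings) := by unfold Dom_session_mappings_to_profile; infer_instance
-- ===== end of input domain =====

-- B differs from A by decomposition: one independent first-match scan per entity type
-- instead of one interleaved pass over mutable first-wins state.

-- shared primitive: Python's `(data.get(k) or "")` on the association list `data`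
def pvGetOrEmpty (data : List (String × Option String)) (k : String) : String :=
  (((data.find? (fun p => p.1 == k)).map (·.2)).join).getD ""

-- ===== PORT A =====
def session_mappings_to_profile (mappings : List (String × List (String × Option String))) : List (String × Option String) :=
  let profile := mappings.foldl
    (fun (p : Option String × Option String × Option String) td =>
      let orig := PySem.Str.strip (pvGetOrEmpty td.2 "original")
      if orig = "" then p
      else
        let et := PySem.Str.upper (pvGetOrEmpty td.2 "entity_type")
        if et = "USER" ∧ p.1 = none then (some orig, p.2.1, p.2.2)
        else if et = "COLLEGE" ∧ p.2.1 = none then (p.1, some orig, p.2.2)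
        else if et = "EMAIL" ∧ p.2.2 = none then (p.1, p.2.1, some orig)
        else p)
    (none, none, none)
  [("name", profile.1), ("college", profile.2.1), ("email", profile.2.2)]

-- ===== PORT B =====
def pvFirst (mappings : List (String × List (String × Option String))) (etype : String) : Option String :=
  match mappings with
  | [] => none
  | td :: rest =>
    let orig := PySem.Str.strip (pvGetOrEmpty td.2 "original")
    if orig ≠ "" ∧ PySem.Str.upper (pvGetOrEmpty td.2 "entity_type") = etype then some orig
    else pvFirst rest etype

def session_mappings_to_profile_alt (mappings : List (String × List (String × Option String))) : List (String × Option String) :=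
  [("name", pvFirst mappings "USER"), ("college", pvFirst mappings "COLLEGE"), ("email", pvFirst mappings "EMAIL")]

-- ===== PRECONDITION & SPEC =====
def Spec_session_mappings_to_profile (mappings : List (String × List (String × Option String))) (out : List (String × Option String)) : Prop := out = session_mappings_to_profile_alt mappings
instance (mappings : List (String × List (String × Option String))) (out : List (String × Option String)) : Decidable (Spec_session_mappings_to_profile mappings out) := by unfold Spec_session_mappings_to_profile; infer_instance

-- ===== CLAIM (what is proved, stated in full; the proofs are below) =====
def Claim_equal_session_mappings_to_profile : Prop := ∀ (mappings : List (String × List (String × Option String))), Dom_session_mappings_to_profile mappings → Spec_session_mappings_to_profile mappings (session_mappings_to_profile mappings)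

-- ===== LEMMAS AND PROOFS =====

-- A's interleaved fold, componentwise: each slot keeps its current value if set,
-- otherwise becomes the first matching entry of the remaining list.
theorem foldA_eq_first (mappings : List (String × List (String × Option String)))
    (a b c : Option String) :
    mappings.foldl
      (fun (p : Option String × Option String × Option String) td =>
        let orig := PySem.Str.strip (pvGetOrEmpty td.2 "original")
        if orig = "" then p
        else
          let et := PySem.Str.upper (pvGetOrEmpty td.2 "entity_type")
          if et = "USER" ∧ p.1 = none then (some orig, p.2.1, p.2.2)
          else if et = "COLLEGE" ∧ p.2.1 = none then (p.1, some orig, p.2.2)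
          else if et = "EMAIL" ∧ p.2.2 = none then (p.1, p.2.1, some orig)
          else p)
      (a, b, c)
    = (a.or (pvFirst mappings "USER"), b.or (pvFirst mappings "COLLEGE"),
       c.or (pvFirst mappings "EMAIL")) := by
  induction mappings generalizing a b c with
  | nil => simp [pvFirst]
  | cons td rest ih =>
    simp only [List.foldl_cons, pvFirst]
    by_cases horig : PySem.Str.strip (pvGetOrEmpty td.2 "original") = ""
    · simp [horig, ih]
    · simp only [horig, ne_eq, not_false_iff, true_and]
      set et := PySem.Str.upper (pvGetOrEmpty td.2 "entity_type") with het
      by_cases hU : et = "USER"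
      · cases a with
        | none => simp [hU, ih]
        | some x => simp [hU, ih]
      · by_cases hC : et = "COLLEGE"
        · cases b with
          | none => simp [hC, ih]
          | some x => simp [hC, ih]
        · by_cases hE : et = "EMAIL"
          · cases c with
            | none => simp [hE, ih]
            | some x => simp [hE, ih]
          · simp [hU, hC, hE, ih]

-- ===== VERDICT (by name: the statement is the Claim_ definition above) =====
theorem session_mappings_to_profile_spec : Claim_equal_session_mappings_to_profile := by
  intro mappings _
  unfold Spec_session_mappings_to_profile session_mappings_to_profile session_mappings_to_profile_alt
  rw [foldA_eq_first]
  simp
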